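-- pv_equiv track=rewrite | github.com/pratibhamahajan2003-max/Learningplatform | learnai/learnai/backend/app.py | _check_level_up
-- ===== SOURCE A (Python) =====
-- def _check_level_up(user):
--     levels = [0,500,1200,2200,3500,5000,7000,9500,12500,16000,20000]
--     for i, threshold in enumerate(levels):
--         if user['xp'] < threshold:
--             user['level'] = max(1, i)
--             user['xp_max'] = threshold
--             break
--     else:
--         user['level'] = 10
--     return user
-- ===== SOURCE B (Python) =====
-- def _check_level_up(user):
--     levels = [0, 500, 1200, 2200, 3500, 5000, 7000, 9500, 12500, 16000, 20000]
--     xp = user['xp']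
--     # binary search: lo = bisect_right(levels, xp) = first index with xp < levels[lo]
--     lo, hi = 0, len(levels)
--     while lo < hi:
--         mid = (lo + hi) // 2
--         if xp < levels[mid]:
--             hi = mid
--         else:
--             lo = mid + 1
--     if lo == len(levels):
--         user['level'] = 10
--     else:
--         user['level'] = max(1, lo)
--         user['xp_max'] = levels[lo]
--     return user
-- ===== Notes on version B (the rewrite author's own statement) =====
-- stated objective: alternative
-- what changed: Replaces the linear early-break scan over the thresholds with a hand-written binary search (bisect_right) over the sorted threshold list, then assigns level/xp_max from the found index.
import Mathlib
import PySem

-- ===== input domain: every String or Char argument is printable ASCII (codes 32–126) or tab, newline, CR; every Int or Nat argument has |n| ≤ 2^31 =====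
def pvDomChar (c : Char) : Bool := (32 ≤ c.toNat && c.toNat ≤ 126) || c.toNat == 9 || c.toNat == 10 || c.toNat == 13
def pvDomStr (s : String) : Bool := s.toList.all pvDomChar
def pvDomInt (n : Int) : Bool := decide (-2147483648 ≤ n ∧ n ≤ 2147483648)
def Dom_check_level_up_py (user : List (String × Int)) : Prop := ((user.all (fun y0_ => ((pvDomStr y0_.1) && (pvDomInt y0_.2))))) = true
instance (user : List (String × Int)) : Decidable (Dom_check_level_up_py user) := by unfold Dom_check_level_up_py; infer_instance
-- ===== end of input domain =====

set_option maxRecDepth 4000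
set_option maxHeartbeats 1000000


-- B replaces A's linear early-break threshold scan with a binary search over the same
-- sorted thresholds (same cost on 11 elements; 'alternative'). Both mutate the dict the
-- same way in Python; the equivalence proved here is about the return value.

-- ===== PORT A =====
-- for i, threshold in enumerate(levels): if xp < threshold: set and break; else-clause: level = 10
def aLoop (d : PySem.Dict String Int) (xp : Int) : List (Int × Int) → PySem.Dict String Int
  | [] => d.insert "level" 10
  | (i, t) :: rest =>
      if xp < t then (d.insert "level" (max 1 i)).insert "xp_max" t
      else aLoop d xp rest

def check_level_up_py (user : List (String × Int)) : List (String × Int) :=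
  let d := PySem.Dict.mk user
  match d.get? "xp" with
  | none => user   -- user['xp'] raises KeyError; excluded by Pre_
  | some xp =>
      (aLoop d xp (PySem.List.enumerate [0, 500, 1200, 2200, 3500, 5000, 7000, 9500, 12500, 16000, 20000])).items

-- ===== PORT B =====
-- while lo < hi: mid = (lo+hi)//2; if xp < levels[mid]: hi = mid else: lo = mid+1
-- (the index mid is always in range in Source B, so getD's default 0 is never used)
def bisectRight (xs : List Int) (x : Int) (lo hi : Nat) : Nat :=
  if lo < hi then
    let mid := (lo + hi) / 2
    if x < xs.getD mid 0 then bisectRight xs x lo mid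
    else bisectRight xs x (mid + 1) hi
  else lo
termination_by hi - lo
decreasing_by all_goals omega

def check_level_up_py_alt (user : List (String × Int)) : List (String × Int) :=
  let levels : List Int := [0, 500, 1200, 2200, 3500, 5000, 7000, 9500, 12500, 16000, 20000]
  let d := PySem.Dict.mk user
  match d.get? "xp" with
  | none => user   -- user['xp'] raises KeyError; excluded by Pre_
  | some xp =>
      let lo := bisectRight levels xp 0 levels.length
      if lo = levels.length then (d.insert "level" 10).items
      else ((d.insert "level" (max 1 (lo : Int))).insert "xp_max" (levels.getD lo 0)).items

-- ===== PRECONDITION & SPEC =====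
-- Pre_ excludes exactly the dicts without an "xp" key, on which Python's user['xp'] raises KeyError.
def Pre_check_level_up_py (user : List (String × Int)) : Prop :=
  (user.any (fun p => p.1 == "xp")) = true
instance (user : List (String × Int)) : Decidable (Pre_check_level_up_py user) := by
  unfold Pre_check_level_up_py; infer_instance

def pvWitness_check_level_up_py : (List (String × Int)) := [("xp", 1300), ("level", 2)]

def Spec_check_level_up_py (user : List (String × Int)) (out : List (String × Int)) : Prop := out = check_level_up_py_alt user
instance (user : List (String × Int)) (out : List (String × Int)) : Decidable (Spec_check_level_up_py user out) := by unfold Spec_check_level_up_py; infer_instance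

-- ===== CLAIM (what is proved, stated in full; the proofs are below) =====
def Claim_equal_check_level_up_py : Prop := ∀ (user : List (String × Int)), Dom_check_level_up_py user → Pre_check_level_up_py user → Spec_check_level_up_py user (check_level_up_py user)

-- ===== LEMMAS AND PROOFS =====

-- evaluation of the binary search on the fixed threshold list, node by node
lemma bR_0_0 (x : Int) : bisectRight [0, 500, 1200, 2200, 3500, 5000, 7000, 9500, 12500, 16000, 20000] x 0 0 = 0 := by rw [bisectRight]; norm_num
lemma bR_1_1 (x : Int) : bisectRight [0, 500, 1200, 2200, 3500, 5000, 7000, 9500, 12500, 16000, 20000] x 1 1 = 1 := by rw [bisectRight]; norm_num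
lemma bR_0_1 (x : Int) : bisectRight [0, 500, 1200, 2200, 3500, 5000, 7000, 9500, 12500, 16000, 20000] x 0 1 = (if x < 0 then 0 else 1) := by rw [bisectRight]; norm_num [bR_0_0, bR_1_1]
lemma bR_2_2 (x : Int) : bisectRight [0, 500, 1200, 2200, 3500, 5000, 7000, 9500, 12500, 16000, 20000] x 2 2 = 2 := by rw [bisectRight]; norm_num
lemma bR_0_2 (x : Int) : bisectRight [0, 500, 1200, 2200, 3500, 5000, 7000, 9500, 12500, 16000, 20000] x 0 2 = (if x < 500 then (if x < 0 then 0 else 1) else 2) := by rw [bisectRight]; norm_num [bR_0_1, bR_2_2]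
lemma bR_3_3 (x : Int) : bisectRight [0, 500, 1200, 2200, 3500, 5000, 7000, 9500, 12500, 16000, 20000] x 3 3 = 3 := by rw [bisectRight]; norm_num
lemma bR_4_4 (x : Int) : bisectRight [0, 500, 1200, 2200, 3500, 5000, 7000, 9500, 12500, 16000, 20000] x 4 4 = 4 := by rw [bisectRight]; norm_num
lemma bR_3_4 (x : Int) : bisectRight [0, 500, 1200, 2200, 3500, 5000, 7000, 9500, 12500, 16000, 20000] x 3 4 = (if x < 2200 then 3 else 4) := by rw [bisectRight]; norm_num [bR_3_3, bR_4_4]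
lemma bR_5_5 (x : Int) : bisectRight [0, 500, 1200, 2200, 3500, 5000, 7000, 9500, 12500, 16000, 20000] x 5 5 = 5 := by rw [bisectRight]; norm_num
lemma bR_3_5 (x : Int) : bisectRight [0, 500, 1200, 2200, 3500, 5000, 7000, 9500, 12500, 16000, 20000] x 3 5 = (if x < 3500 then (if x < 2200 then 3 else 4) else 5) := by rw [bisectRight]; norm_num [bR_3_4, bR_5_5]
lemma bR_0_5 (x : Int) : bisectRight [0, 500, 1200, 2200, 3500, 5000, 7000, 9500, 12500, 16000, 20000] x 0 5 = (if x < 1200 then (if x < 500 then (if x < 0 then 0 else 1) else 2) else (if x < 3500 then (if x < 2200 then 3 else 4) else 5)) := by rw [bisectRight]; norm_num [bR_0_2, bR_3_5]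
lemma bR_6_6 (x : Int) : bisectRight [0, 500, 1200, 2200, 3500, 5000, 7000, 9500, 12500, 16000, 20000] x 6 6 = 6 := by rw [bisectRight]; norm_num
lemma bR_7_7 (x : Int) : bisectRight [0, 500, 1200, 2200, 3500, 5000, 7000, 9500, 12500, 16000, 20000] x 7 7 = 7 := by rw [bisectRight]; norm_num
lemma bR_6_7 (x : Int) : bisectRight [0, 500, 1200, 2200, 3500, 5000, 7000, 9500, 12500, 16000, 20000] x 6 7 = (if x < 7000 then 6 else 7) := by rw [bisectRight]; norm_num [bR_6_6, bR_7_7]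
lemma bR_8_8 (x : Int) : bisectRight [0, 500, 1200, 2200, 3500, 5000, 7000, 9500, 12500, 16000, 20000] x 8 8 = 8 := by rw [bisectRight]; norm_num
lemma bR_6_8 (x : Int) : bisectRight [0, 500, 1200, 2200, 3500, 5000, 7000, 9500, 12500, 16000, 20000] x 6 8 = (if x < 9500 then (if x < 7000 then 6 else 7) else 8) := by rw [bisectRight]; norm_num [bR_6_7, bR_8_8]
lemma bR_9_9 (x : Int) : bisectRight [0, 500, 1200, 2200, 3500, 5000, 7000, 9500, 12500, 16000, 20000] x 9 9 = 9 := by rw [bisectRight]; norm_num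
lemma bR_10_10 (x : Int) : bisectRight [0, 500, 1200, 2200, 3500, 5000, 7000, 9500, 12500, 16000, 20000] x 10 10 = 10 := by rw [bisectRight]; norm_num
lemma bR_9_10 (x : Int) : bisectRight [0, 500, 1200, 2200, 3500, 5000, 7000, 9500, 12500, 16000, 20000] x 9 10 = (if x < 16000 then 9 else 10) := by rw [bisectRight]; norm_num [bR_9_9, bR_10_10]
lemma bR_11_11 (x : Int) : bisectRight [0, 500, 1200, 2200, 3500, 5000, 7000, 9500, 12500, 16000, 20000] x 11 11 = 11 := by rw [bisectRight]; norm_num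
lemma bR_9_11 (x : Int) : bisectRight [0, 500, 1200, 2200, 3500, 5000, 7000, 9500, 12500, 16000, 20000] x 9 11 = (if x < 20000 then (if x < 16000 then 9 else 10) else 11) := by rw [bisectRight]; norm_num [bR_9_10, bR_11_11]
lemma bR_6_11 (x : Int) : bisectRight [0, 500, 1200, 2200, 3500, 5000, 7000, 9500, 12500, 16000, 20000] x 6 11 = (if x < 12500 then (if x < 9500 then (if x < 7000 then 6 else 7) else 8) else (if x < 20000 then (if x < 16000 then 9 else 10) else 11)) := by rw [bisectRight]; norm_num [bR_6_8, bR_9_11]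
lemma bR_0_11 (x : Int) : bisectRight [0, 500, 1200, 2200, 3500, 5000, 7000, 9500, 12500, 16000, 20000] x 0 11 = (if x < 5000 then (if x < 1200 then (if x < 500 then (if x < 0 then 0 else 1) else 2) else (if x < 3500 then (if x < 2200 then 3 else 4) else 5)) else (if x < 12500 then (if x < 9500 then (if x < 7000 then 6 else 7) else 8) else (if x < 20000 then (if x < 16000 then 9 else 10) else 11))) := by rw [bisectRight]; norm_num [bR_0_5, bR_6_11]


-- ===== VERDICT (by name: the statement is the Claim_ definition above) =====
theorem check_level_up_py_spec : Claim_equal_check_level_up_py := by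
  intro user _ _
  unfold Spec_check_level_up_py check_level_up_py check_level_up_py_alt
  cases hx : (PySem.Dict.mk user).get? "xp" with
  | none => dsimp only; rw [hx]
  | some xp =>
      dsimp only
      rw [hx]
      simp only [List.length_cons, List.length_nil, Nat.reduceAdd]
      rw [bR_0_11]
      norm_num [PySem.List.enumerate_cons, PySem.List.enumerate_nil, aLoop]
      split_ifs <;> first | rfl | exact False.elim ‹False› | omega
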